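-- pv_equiv track=rewrite | github.com/Phangg/algoo | 08/boj13300방배정/boj13300.py | check_room
-- ===== SOURCE A (Python) =====
-- def check_room(lst, k):
--     room_cnt = 0
--     for i in range(1, 7):                           # 1학년부터 6학년까지
--         stu_cnt = 0
--         for j in range(len(lst)):
--             if lst[j][1] == i:                      # 학생 정보에서 학년이 i 와 같을 때
--                 stu_cnt += 1                        # 각 학년 마다 몇명인지
--                 if stu_cnt == k:                    # k(한방 인원) 과 같아지면
--                     room_cnt += 1                   # 방 개수 +1
--                     stu_cnt = 0                     # 학생수 초기화
--             if j == len(lst)-1 and stu_cnt:         # 그런거 관계 없이 리스트 다 돌았을때, 학생 카운트 수가 0이 아니라면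
--                 room_cnt += 1                       # 방 +1
--     return room_cnt
-- ===== SOURCE B (Python) =====
-- def check_room(lst, k):
--     counts = {}
--     for stu in lst:
--         counts[stu[1]] = counts.get(stu[1], 0) + 1
--     return sum((counts.get(g, 0) + k - 1) // k for g in range(1, 7))
-- ===== Notes on version B (the rewrite author's own statement) =====
-- stated objective: simpler
-- what changed: B builds a per-grade frequency dict in one pass over the students and then sums ceil(count/k) = (count+k-1)//k over grades 1..6, replacing A's six interleaved count-and-emit scans with their end-of-list check.
-- outside the precondition, e.g. on check_room([(1, 1)], 0): A returns 1, B raises ZeroDivisionError; on check_room([(1, 1)], -2): A returns 1, B returns 6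
import Mathlib
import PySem

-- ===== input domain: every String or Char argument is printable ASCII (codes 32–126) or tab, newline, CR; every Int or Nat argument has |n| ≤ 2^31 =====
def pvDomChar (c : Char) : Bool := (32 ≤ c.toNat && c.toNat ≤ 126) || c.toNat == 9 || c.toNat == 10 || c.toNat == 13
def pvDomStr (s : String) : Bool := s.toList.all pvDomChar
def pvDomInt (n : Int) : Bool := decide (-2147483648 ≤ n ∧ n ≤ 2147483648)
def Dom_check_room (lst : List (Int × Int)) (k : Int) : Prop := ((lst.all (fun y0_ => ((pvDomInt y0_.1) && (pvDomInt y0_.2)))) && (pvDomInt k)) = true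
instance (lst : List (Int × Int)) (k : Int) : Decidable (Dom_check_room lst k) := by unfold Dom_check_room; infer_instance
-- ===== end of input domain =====

-- B: one frequency-dict pass, then per-grade ceiling division — simpler than A's six interleaved count-and-emit scans.

-- ===== PORT A =====
-- lst[j] is always in range here (j ∈ range(len(lst))), so pyGetD with a dummy default is exact
def check_room (lst : List (Int × Int)) (k : Int) : Int :=
  ((PySem.List.pyRange 1 7 1).foldl (fun room_cnt i =>
    ((PySem.List.pyRange 0 (lst.length : Int) 1).foldl (fun (st : Int × Int) j =>
      let st2 :=
        if (PySem.List.pyGetD lst j ((0 : Int), (0 : Int))).2 = i then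
          let s := st.2 + 1
          if s = k then (st.1 + 1, (0 : Int)) else (st.1, s)
        else st
      if j = (lst.length : Int) - 1 ∧ st2.2 ≠ 0 then (st2.1 + 1, st2.2) else st2)
      (room_cnt, (0 : Int))).1) 0)

-- ===== PORT B =====
def check_room_alt (lst : List (Int × Int)) (k : Int) : Int :=
  let counts : PySem.Dict Int Int :=
    lst.foldl (fun d stu => d.insert stu.2 (d.getD stu.2 0 + 1)) PySem.Dict.empty
  (PySem.List.pyRange 1 7 1).foldl
    (fun acc g => acc + PySem.Int.floordiv (counts.getD g 0 + k - 1) k) 0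

-- ===== PRECONDITION & SPEC =====
-- Pre_ restricts to the task's natural domain, room capacity k ≥ 1: for k ≤ 0 A's 'stu_cnt == k'
-- test can never fire and A returns one room per nonempty grade, while B's ceiling division
-- raises ZeroDivisionError at k = 0 and floor-divides by a negative k otherwise.
def Pre_check_room (lst : List (Int × Int)) (k : Int) : Prop := 1 ≤ k
instance (lst : List (Int × Int)) (k : Int) : Decidable (Pre_check_room lst k) := by unfold Pre_check_room; infer_instance
def pvWitness_check_room : (List (Int × Int)) × Int := ([(1, 1), (2, 1), (3, 2)], 2)

def Spec_check_room (lst : List (Int × Int)) (k : Int) (out : Int) : Prop := out = check_room_alt lst k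
instance (lst : List (Int × Int)) (k : Int) (out : Int) : Decidable (Spec_check_room lst k out) := by unfold Spec_check_room; infer_instance

-- ===== CLAIM (what is proved, stated in full; the proofs are below) =====
def Claim_equal_check_room : Prop := ∀ (lst : List (Int × Int)) (k : Int), Dom_check_room lst k → Pre_check_room lst k → Spec_check_room lst k (check_room lst k)

-- ===== LEMMAS AND PROOFS =====

lemma pvFoldlCongr {α β : Type} (l : List β) (f g : α → β → α) (init : α)
    (h : ∀ acc x, x ∈ l → f acc x = g acc x) : l.foldl f init = l.foldl g init := by
  induction l generalizing init with
  | nil => rfl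
  | cons y ys ih =>
    simp only [List.foldl_cons]
    rw [h init y (by simp)]
    exact ih _ (fun acc x hx => h acc x (by simp [hx]))

-- the pure counting step of A's inner loop (no end-of-list check)
def pvStep (k i : Int) (st : Int × Int) (x : Int × Int) : Int × Int :=
  if x.2 = i then
    let s := st.2 + 1
    if s = k then (st.1 + 1, 0) else (st.1, s)
  else st

-- B's count: the dict fold is a counter over the grades
lemma pvCountsD (lst : List (Int × Int)) (v : Int) :
    (lst.foldl (fun d stu => d.insert stu.2 (d.getD stu.2 0 + 1)) PySem.Dict.empty).getD v 0
      = ((lst.map (·.2)).count v : Int) := by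
  rw [← List.foldl_map (f := fun stu : Int × Int => stu.2)
      (g := fun d x => PySem.Dict.insert d x (d.getD x 0 + 1))]
  rw [PySem.Dict.getD_foldl_insert_add_one]
  simp [PySem.Dict.getD_empty]

-- invariant of the pure counting fold
lemma pvLoopG (k i : Int) (hk : 1 ≤ k) (ys : List (Int × Int)) :
    ∀ (r s : Int), 0 ≤ s → s < k →
      ys.foldl (pvStep k i) (r, s) =
        (r + PySem.Int.floordiv (s + ((ys.map (·.2)).count i : Int)) k,
         PySem.Int.mod (s + ((ys.map (·.2)).count i : Int)) k) := by
  induction ys with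
  | nil =>
    intro r s h0 h1
    simp only [List.foldl_nil, List.map_nil, List.count_nil]
    rw [PySem.Int.floordiv_eq_ediv_of_pos (by omega), PySem.Int.mod_eq_emod_of_pos (by omega)]
    rw [Int.ediv_eq_zero_of_lt (by omega) (by omega), Int.emod_eq_of_lt (by omega) (by omega)]
    simp
  | cons x ys ih =>
    intro r s h0 h1
    simp only [List.foldl_cons, List.map_cons]
    by_cases hx : x.2 = i
    · simp only [pvStep, hx, if_true]
      by_cases hs : s + 1 = k
      · rw [if_pos hs, ih (r + 1) 0 le_rfl (by omega)]
        rw [PySem.Int.floordiv_eq_ediv_of_pos (by omega), PySem.Int.mod_eq_emod_of_pos (by omega),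
            PySem.Int.floordiv_eq_ediv_of_pos (by omega), PySem.Int.mod_eq_emod_of_pos (by omega)]
        have hc : (((i :: ys.map (·.2)).count i : Nat) : Int)
            = ((ys.map (·.2)).count i : Int) + 1 := by
          simp
        rw [hc]
        set c : Int := ((ys.map (·.2)).count i : Int) with hcdef
        have harg : s + (c + 1) = c + 1 * k := by omega
        rw [harg, Int.add_mul_ediv_right _ _ (by omega : k ≠ 0), Int.add_mul_emod_self_right,
            Prod.mk.injEq]
        simp only [zero_add]
        refine ⟨?_, trivial⟩
        generalize c / k = q
        omega
      · rw [if_neg hs, ih r (s + 1) (by omega) (by omega)]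
        have hc : (((i :: ys.map (·.2)).count i : Nat) : Int)
            = ((ys.map (·.2)).count i : Int) + 1 := by
          simp
        rw [hc]
        have harg : s + 1 + ((ys.map (·.2)).count i : Int)
            = s + (((ys.map (·.2)).count i : Int) + 1) := by ring
        rw [harg]
    · simp only [pvStep, hx, if_false]
      rw [ih r s h0 h1]
      have hc : (((x.2 :: ys.map (·.2)).count i : Nat) : Int)
          = ((ys.map (·.2)).count i : Int) := by
        simp [List.count_cons, hx]
      rw [hc]

-- A's inner loop for grade i equals r + ceil(count/k)
lemma pvInner (lst : List (Int × Int)) (k i : Int) (hk : 1 ≤ k) (r : Int) :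
    ((PySem.List.pyRange 0 (lst.length : Int) 1).foldl (fun (st : Int × Int) j =>
      let st2 :=
        if (PySem.List.pyGetD lst j ((0 : Int), (0 : Int))).2 = i then
          let s := st.2 + 1
          if s = k then (st.1 + 1, (0 : Int)) else (st.1, s)
        else st
      if j = (lst.length : Int) - 1 ∧ st2.2 ≠ 0 then (st2.1 + 1, st2.2) else st2)
      (r, (0 : Int))).1
    = r + PySem.Int.floordiv (((lst.map (·.2)).count i : Int) + k - 1) k := by
  rcases List.eq_nil_or_concat lst with hnil | ⟨ys, z, rfl⟩
  · subst hnil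
    rw [PySem.Int.floordiv_eq_ediv_of_pos (by omega)]
    simp only [List.length_nil, Int.natCast_zero, PySem.List.pyRange_one_eq_nil le_rfl,
      List.foldl_nil, List.map_nil, List.count_nil, Int.natCast_zero]
    rw [Int.ediv_eq_zero_of_lt (by omega) (by omega)]
    ring
  · simp only [List.concat_eq_append]
    have h1 : (((ys ++ [z]).length : Nat) : Int) = (ys.length : Int) + 1 := by
      simp [List.length_append]
    rw [h1, PySem.List.pyRange_one_succ_right (by omega), List.foldl_append]
    simp only [List.foldl_cons, List.foldl_nil]
    rw [pvFoldlCongr (PySem.List.pyRange 0 (ys.length : Int) 1) _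
        (fun st j => pvStep k i st (PySem.List.pyGetD ys j ((0 : Int), (0 : Int)))) (r, (0 : Int))
        (by
          intro st j hj
          rcases PySem.List.mem_pyRange_one.mp hj with ⟨hj0, hj1⟩
          obtain ⟨m, rfl⟩ : ∃ m : Nat, j = (m : Int) := ⟨j.toNat, (Int.toNat_of_nonneg hj0).symm⟩
          have hm : m < ys.length := by exact_mod_cast hj1
          have hget : PySem.List.pyGetD (ys ++ [z]) (m : Int) ((0 : Int), (0 : Int))
              = PySem.List.pyGetD ys (m : Int) ((0 : Int), (0 : Int)) := by
            rw [PySem.List.pyGetD_natCast, PySem.List.pyGetD_natCast]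
            exact List.getD_append ys [z] _ m hm
          have hne : ¬((m : Int) = (ys.length : Int) + 1 - 1) := by omega
          have hne2 : ¬(m = ys.length) := by omega
          simp [pvStep, hget, hne2])]
    rw [PySem.List.foldl_pyRange_zero_pyGetD' ys ((0 : Int), (0 : Int)) (pvStep k i) (r, (0 : Int))]
    rw [pvLoopG k i hk ys r 0 le_rfl (by omega)]
    have hgetz : PySem.List.pyGetD (ys ++ [z]) ((ys.length : Nat) : Int) ((0 : Int), (0 : Int)) = z := by
      rw [PySem.List.pyGetD_natCast]
      simp [List.getD_eq_getElem?_getD]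
    rw [hgetz]
    simp only [PySem.Int.floordiv_eq_ediv_of_pos (show (0 : Int) < k by omega),
      PySem.Int.mod_eq_emod_of_pos (show (0 : Int) < k by omega)]
    have hcnt : (((ys ++ [z]).map (·.2)).count i : Int)
        = ((ys.map (·.2)).count i : Int) + (if z.2 = i then 1 else 0) := by
      by_cases hz : z.2 = i <;> simp [List.count_append, hz]
    rw [hcnt]
    set c1 : Int := ((ys.map (·.2)).count i : Int) with hc1def
    have hc1 : 0 ≤ c1 := by positivity
    have hk0 : k ≠ 0 := by omega
    have hqr : k * (c1 / k) + c1 % k = c1 := Int.mul_ediv_add_emod c1 k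
    have hr0 : 0 ≤ c1 % k := Int.emod_nonneg _ hk0
    have hr1 : c1 % k < k := Int.emod_lt_of_pos _ (by omega)
    simp only [add_sub_cancel_right, true_and, zero_add]
    obtain ⟨Q, hQ⟩ : ∃ t, c1 / k = t := ⟨_, rfl⟩
    obtain ⟨R, hR⟩ : ∃ t, c1 % k = t := ⟨_, rfl⟩
    simp only [hQ, hR] at hqr hr0 hr1 ⊢
    by_cases hz : z.2 = i
    · simp only [if_pos hz]
      rw [show c1 + 1 + k - 1 = c1 + 1 * k from by ring,
        Int.add_mul_ediv_right _ _ hk0, hQ]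
      by_cases hs : R + 1 = k
      · rw [if_pos hs]
        simp
        omega
      · rw [if_neg hs]
        simp [show R + 1 ≠ 0 by omega]
        omega
    · simp only [if_neg hz, add_zero]
      by_cases h0 : R = 0
      · rw [show c1 + k - 1 = (k - 1) + Q * k from by rw [← hqr, h0]; ring,
          Int.add_mul_ediv_right _ _ hk0, Int.ediv_eq_zero_of_lt (by omega) (by omega)]
        simp [h0]
      · rw [show c1 + k - 1 = (R - 1) + (Q + 1) * k from by rw [← hqr]; ring,
          Int.add_mul_ediv_right _ _ hk0, Int.ediv_eq_zero_of_lt (by omega) (by omega)]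
        simp [h0]
        omega

-- ===== VERDICT (by name: the statement is the Claim_ definition above) =====
theorem check_room_spec : Claim_equal_check_room := by
  intro lst k _ hk
  unfold Spec_check_room check_room check_room_alt
  exact pvFoldlCongr _ _ _ _ (fun acc x _ => by
    rw [pvInner lst k x hk acc, pvCountsD lst x])
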